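-- pv_equiv track=rewrite | github.com/stevenchew83/AsterProof | inspinia/catalog/latex_utils.py | lint_statement_source
-- ===== SOURCE A (Python) =====
-- _BANNED_COMMANDS = (
--     r"\write18",
--     r"\input",
--     r"\include",
--     r"\openout",
--     r"\read",
-- )
--
-- def lint_statement_source(source: str, statement_format: str) -> list[str]:
--     """Return non-fatal validation errors for statement content."""
--     if statement_format not in {"latex", "markdown_tex"}:
--         return []
--
--     issues: list[str] = []
--     if "\x00" in source:
--         issues.append("LaTeX content contains a null byte.")
--
--     for command in _BANNED_COMMANDS:
--         if command in source:
--             issues.append(f"Disallowed LaTeX command detected: {command}")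
--
--     open_braces = 0
--     escaped = False
--     for char in source:
--         if escaped:
--             escaped = False
--             continue
--         if char == "\\":
--             escaped = True
--             continue
--         if char == "{":
--             open_braces += 1
--         elif char == "}":
--             open_braces -= 1
--             if open_braces < 0:
--                 issues.append("Unbalanced braces in LaTeX content.")
--                 break
--
--     if open_braces > 0:
--         issues.append("Unbalanced braces in LaTeX content.")
--
--     return issues
-- ===== SOURCE B (Python) =====
-- _BANNED_COMMANDS = (
--     r"\write18",
--     r"\input",
--     r"\include",
--     r"\openout",
--     r"\read",
-- )
--
--
-- def _strip_escapes(s):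
--     """Drop every backslash together with the character it escapes (one pass)."""
--     out = []
--     i = 0
--     n = len(s)
--     while i < n:
--         if s[i] == "\\":
--             i += 2  # skip the backslash and the escaped character
--         else:
--             out.append(s[i])
--             i += 1
--     return "".join(out)
--
--
-- def lint_statement_source(source: str, statement_format: str) -> list[str]:
--     """Return non-fatal validation errors for statement content."""
--     if statement_format not in ("latex", "markdown_tex"):
--         return []
--
--     issues = ["LaTeX content contains a null byte."] if "\x00" in source else []
--     issues += [
--         f"Disallowed LaTeX command detected: {command}"
--         for command in _BANNED_COMMANDS
--         if command in source
--     ]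
--
--     balance = 0
--     for char in _strip_escapes(source):
--         if char == "{":
--             balance += 1
--         elif char == "}":
--             balance -= 1
--             if balance < 0:
--                 issues.append("Unbalanced braces in LaTeX content.")
--                 break
--     if balance > 0:
--         issues.append("Unbalanced braces in LaTeX content.")
--     return issues
-- ===== Notes on version B (the rewrite author's own statement) =====
-- stated objective: alternative
-- what changed: Escape handling is factored out of the brace scan: B first strips every backslash-plus-escaped-character pair in a separate pass, then runs a plain +1/-1 brace counter over the cleaned text (no escaped flag), and the banned-command report is a comprehension instead of an accumulator loop.
import Mathlib
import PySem

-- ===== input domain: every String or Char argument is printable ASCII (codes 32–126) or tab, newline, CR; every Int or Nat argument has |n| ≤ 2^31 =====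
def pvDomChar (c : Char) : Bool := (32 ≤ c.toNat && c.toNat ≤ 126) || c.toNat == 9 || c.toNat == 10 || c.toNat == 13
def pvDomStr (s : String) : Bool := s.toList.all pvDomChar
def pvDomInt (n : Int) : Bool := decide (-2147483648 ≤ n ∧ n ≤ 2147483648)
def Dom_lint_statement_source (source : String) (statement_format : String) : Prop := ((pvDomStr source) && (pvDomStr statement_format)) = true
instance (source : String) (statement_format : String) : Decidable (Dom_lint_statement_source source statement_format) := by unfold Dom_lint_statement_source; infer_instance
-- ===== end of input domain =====

-- B factors escape handling out of A's single flag-carrying brace scan into a separate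
-- strip-escapes pass followed by a plain counter ("alternative" decomposition, same cost).

-- module-level constant shared by both Pythons
def pvBannedCommands : List String :=
  ["\\write18", "\\input", "\\include", "\\openout", "\\read"]

-- ===== PORT A =====
-- A's brace loop: state (open_braces, escaped); on a '}' driving the count negative it
-- appends the message and breaks (returning the issues so far and the negative count).
def pvLintLoopA : List Char → Int → Bool → List String → (List String × Int)
  | [], ob, _, iss => (iss, ob)
  | c :: t, ob, esc, iss =>
    if esc then pvLintLoopA t ob false iss
    else if c = '\\' then pvLintLoopA t ob true iss
    else if c = '{' then pvLintLoopA t (ob + 1) false iss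
    else if c = '}' then
      if ob - 1 < 0 then (iss ++ ["Unbalanced braces in LaTeX content."], ob - 1)
      else pvLintLoopA t (ob - 1) false iss
    else pvLintLoopA t ob false iss

def lint_statement_source (source : String) (statement_format : String) : List String :=
  if ¬ (statement_format = "latex" ∨ statement_format = "markdown_tex") then []
  else
    let issues : List String := []
    let issues := if PySem.Str.isIn "\x00" source then issues ++ ["LaTeX content contains a null byte."] else issues
    let issues := pvBannedCommands.foldl
      (fun iss cmd => if PySem.Str.isIn cmd source then iss ++ ["Disallowed LaTeX command detected: " ++ cmd] else iss)
      issues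
    let r := pvLintLoopA source.toList 0 false issues
    if r.2 > 0 then r.1 ++ ["Unbalanced braces in LaTeX content."] else r.1

-- ===== PORT B =====
-- B's first pass: drop each backslash together with the character it escapes.
def pvStripEscapes : List Char → List Char
  | [] => []
  | c :: t =>
    if c = '\\' then
      match t with
      | [] => []
      | _ :: u => pvStripEscapes u
    else c :: pvStripEscapes t

-- B's second pass: plain +1/-1 counter, message and break when it first goes negative.
def pvScanB : List Char → Int → List String → (List String × Int)
  | [], b, iss => (iss, b)
  | c :: t, b, iss =>
    if c = '{' then pvScanB t (b + 1) iss
    else if c = '}' then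
      if b - 1 < 0 then (iss ++ ["Unbalanced braces in LaTeX content."], b - 1)
      else pvScanB t (b - 1) iss
    else pvScanB t b iss

def lint_statement_source_alt (source : String) (statement_format : String) : List String :=
  if statement_format = "latex" ∨ statement_format = "markdown_tex" then
    let issues :=
      (if PySem.Str.isIn "\x00" source then ["LaTeX content contains a null byte."] else [])
      ++ (pvBannedCommands.filter (fun cmd => PySem.Str.isIn cmd source)).map
           (fun cmd => "Disallowed LaTeX command detected: " ++ cmd)
    let r := pvScanB (pvStripEscapes source.toList) 0 issues
    if r.2 > 0 then r.1 ++ ["Unbalanced braces in LaTeX content."] else r.1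
  else []

-- ===== PRECONDITION & SPEC =====
def Spec_lint_statement_source (source : String) (statement_format : String) (out : List String) : Prop := out = lint_statement_source_alt source statement_format
instance (source : String) (statement_format : String) (out : List String) : Decidable (Spec_lint_statement_source source statement_format out) := by unfold Spec_lint_statement_source; infer_instance

-- ===== CLAIM (what is proved, stated in full; the proofs are below) =====
def Claim_equal_lint_statement_source : Prop := ∀ (source : String) (statement_format : String), Dom_lint_statement_source source statement_format → Spec_lint_statement_source source statement_format (lint_statement_source source statement_format)

-- ===== LEMMAS AND PROOFS =====

-- pvStripEscapes equation lemmas (its nested match blocks simp's own unfolding)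
theorem pvStrip_cons (c : Char) (t : List Char) (h : ¬ c = '\\') :
    pvStripEscapes (c :: t) = c :: pvStripEscapes t := by
  rw [pvStripEscapes.eq_def]; simp [h]

theorem pvStrip_esc2 (d : Char) (u : List Char) :
    pvStripEscapes ('\\' :: d :: u) = pvStripEscapes u := by
  rw [pvStripEscapes.eq_def]; simp

theorem pvStrip_esc1 : pvStripEscapes ['\\'] = [] := by
  rw [pvStripEscapes.eq_def]; simp

-- A's flag-carrying scan (flag initially off) equals B's scan of the escape-stripped text.
theorem pvLoop_eq_scan : ∀ (s : List Char) (ob : Int) (iss : List String),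
    pvLintLoopA s ob false iss = pvScanB (pvStripEscapes s) ob iss
  | [], ob, iss => by simp [pvLintLoopA, pvStripEscapes, pvScanB]
  | c :: t, ob, iss => by
    by_cases hc : c = '\\'
    · subst hc
      match t with
      | [] => simp [pvLintLoopA, pvStrip_esc1, pvScanB]
      | d :: u =>
        have ih := pvLoop_eq_scan u ob iss
        simp [pvLintLoopA, pvStrip_esc2, ih]
    · by_cases h1 : c = '{'
      · subst h1
        have ih := pvLoop_eq_scan t (ob + 1) iss
        rw [pvStrip_cons '{' t (by decide)]
        simp [pvLintLoopA, pvScanB, ih]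
      · by_cases h2 : c = '}'
        · subst h2
          rw [pvStrip_cons '}' t (by decide)]
          by_cases hb : ob - 1 < 0
          · simp [pvLintLoopA, pvScanB, hb]
          · have ih := pvLoop_eq_scan t (ob - 1) iss
            simp [pvLintLoopA, pvScanB, hb, ih]
        · have ih := pvLoop_eq_scan t ob iss
          rw [pvStrip_cons c t hc]
          simp [pvLintLoopA, pvScanB, hc, h1, h2, ih]
  termination_by s _ _ => s.length

-- A's accumulator loop over the banned commands equals B's filter-then-map.
theorem pvBanned_fold_eq (source : String) (iss : List String) :
    pvBannedCommands.foldl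
      (fun iss cmd => if PySem.Str.isIn cmd source then iss ++ ["Disallowed LaTeX command detected: " ++ cmd] else iss)
      iss
    = iss ++ (pvBannedCommands.filter (fun cmd => PySem.Str.isIn cmd source)).map
        (fun cmd => "Disallowed LaTeX command detected: " ++ cmd) := by
  exact PySem.List.foldl_append_if _ _ _ _

-- ===== VERDICT (by name: the statement is the Claim_ definition above) =====
theorem lint_statement_source_spec : Claim_equal_lint_statement_source := by
  intro source fmt _
  unfold Spec_lint_statement_source lint_statement_source lint_statement_source_alt
  by_cases hf : fmt = "latex" ∨ fmt = "markdown_tex"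
  · simp only [hf, not_true, if_neg, not_false_iff, if_pos]
    rw [pvBanned_fold_eq, pvLoop_eq_scan]
    rfl
  · simp [hf]
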